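-- pv_equiv track=rewrite | github.com/KIOS-Research/AIDERS | safeml/app/deepKnowledgeSrc/DeepKnw_run/utils.py | get_relevantneurons
-- ===== SOURCE A (Python) =====
-- def get_relevantneurons(relevant_neurons):
--     relevant = {}
--     layers = []
--     neurons_list = []
--     for n in relevant_neurons:
--         neurons_list.append(n[1])
--         if n[0] not in layers:
--             layers.append(n[0])
--     for x in relevant_neurons:
--         if x[0] in relevant:
--             relevant[x[0]].append(x[1])
--         else:
--             relevant[x[0]] = [x[1]]
--     return relevant
-- ===== SOURCE B (Python) =====
-- def get_relevantneurons(relevant_neurons):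
--     layers = []
--     for n in relevant_neurons:
--         if n[0] not in layers:
--             layers.append(n[0])
--     return {L: [n[1] for n in relevant_neurons if n[0] == L] for L in layers}
-- ===== Notes on version B (the rewrite author's own statement) =====
-- stated objective: simpler
-- what changed: Replaces the single-pass dict-grouping loop (and A's dead neurons_list/layers bookkeeping) with a first-appearance index of distinct layers followed by a per-layer filtering dict comprehension.
import Mathlib
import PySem

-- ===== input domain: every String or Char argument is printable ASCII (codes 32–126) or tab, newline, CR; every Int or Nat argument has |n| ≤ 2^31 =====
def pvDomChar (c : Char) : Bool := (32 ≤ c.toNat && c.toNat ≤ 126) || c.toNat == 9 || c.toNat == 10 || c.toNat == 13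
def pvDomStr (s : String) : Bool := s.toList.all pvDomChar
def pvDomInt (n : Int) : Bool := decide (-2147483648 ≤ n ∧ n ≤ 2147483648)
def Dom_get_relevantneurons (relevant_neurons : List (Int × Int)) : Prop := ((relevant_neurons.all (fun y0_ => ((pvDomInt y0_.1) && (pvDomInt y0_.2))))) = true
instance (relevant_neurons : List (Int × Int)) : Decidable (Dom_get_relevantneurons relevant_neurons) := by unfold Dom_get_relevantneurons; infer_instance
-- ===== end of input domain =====

-- B groups neurons by a first-appearance index of distinct layers plus one filtering
-- scan per layer, instead of A's single-pass dict grouping; objective: simpler.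


-- ===== PORT A =====
-- literal port of A: first loop builds neurons_list and layers (both unused by the
-- return value, kept for faithfulness); second loop groups into the dict 'relevant';
-- the returned dict is its items list in insertion order.
def get_relevantneurons (relevant_neurons : List (Int × Int)) : List (Int × List Int) :=
  let _neurons_list : List Int :=
    relevant_neurons.foldl (fun acc n => acc ++ [n.2]) []
  let _layers : List Int :=
    relevant_neurons.foldl (fun ls n => PySem.Set.add ls n.1) []
  let relevant : PySem.Dict Int (List Int) :=
    relevant_neurons.foldl
      (fun d x =>
        if d.contains x.1 then
          -- relevant[x[0]].append(x[1]) : overwrite in place with the extended list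
          d.insert x.1 (d.getD x.1 [] ++ [x.2])
        else
          d.insert x.1 [x.2])
      PySem.Dict.empty
  relevant.items

-- ===== PORT B =====
-- port of Source B: one pass collecting distinct layers in first-appearance order,
-- then a dict comprehension {L: [n[1] for n in relevant_neurons if n[0] == L] for L in layers};
-- the layers are distinct, so the comprehension's items list is this map.
def get_relevantneurons_alt (relevant_neurons : List (Int × Int)) : List (Int × List Int) :=
  let layers : List Int :=
    relevant_neurons.foldl (fun ls n => PySem.Set.add ls n.1) []
  layers.map (fun L => (L, (relevant_neurons.filter (fun n => n.1 == L)).map (·.2)))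

-- ===== PRECONDITION & SPEC =====
def Spec_get_relevantneurons (relevant_neurons : List (Int × Int)) (out : List (Int × List Int)) : Prop := out = get_relevantneurons_alt relevant_neurons
instance (relevant_neurons : List (Int × Int)) (out : List (Int × List Int)) : Decidable (Spec_get_relevantneurons relevant_neurons out) := by unfold Spec_get_relevantneurons; infer_instance

-- ===== CLAIM (what is proved, stated in full; the proofs are below) =====
def Claim_equal_get_relevantneurons : Prop := ∀ (relevant_neurons : List (Int × Int)), Dom_get_relevantneurons relevant_neurons → Spec_get_relevantneurons relevant_neurons (get_relevantneurons relevant_neurons)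

-- ===== LEMMAS AND PROOFS =====

-- the canonical group-by both sides are shown equal to
def pvGroup (rn : List (Int × Int)) : List (Int × List Int) :=
  (PySem.Set.ofList (rn.map (·.1))).map
    (fun L => (L, (rn.filter (fun n => n.1 == L)).map (·.2)))

-- A's grouping fold, named for the induction
def pvFoldA (rn : List (Int × Int)) : PySem.Dict Int (List Int) :=
  rn.foldl
    (fun d x =>
      if d.contains x.1 then d.insert x.1 (d.getD x.1 [] ++ [x.2])
      else d.insert x.1 [x.2])
    PySem.Dict.empty

theorem pvFoldA_append (rn : List (Int × Int)) (x : Int × Int) :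
    pvFoldA (rn ++ [x]) =
      (if (pvFoldA rn).contains x.1 then
        (pvFoldA rn).insert x.1 ((pvFoldA rn).getD x.1 [] ++ [x.2])
      else (pvFoldA rn).insert x.1 [x.2]) := by
  simp [pvFoldA, List.foldl_append]

theorem pvGroup_keys (rn : List (Int × Int)) :
    (pvGroup rn).map (·.1) = PySem.Set.ofList (rn.map (·.1)) := by
  unfold pvGroup
  rw [List.map_map]
  exact List.map_id'' (fun _ => rfl) _

theorem pvItemsFoldA (rn : List (Int × Int)) :
    (pvFoldA rn).items = pvGroup rn := by
  induction rn using List.reverseRecOn with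
  | nil => simp [pvFoldA, pvGroup, PySem.Set.ofList]; rfl
  | append_singleton rn x ih =>
    have hkeys : (pvFoldA rn).keys = PySem.Set.ofList (rn.map (·.1)) := by
      have h0 : (pvFoldA rn).keys = (pvFoldA rn).items.map (·.1) := rfl
      rw [h0, ih, pvGroup_keys]
    have hnodup : (pvFoldA rn).keys.Nodup := by
      rw [hkeys]; exact PySem.Set.nodup_ofList _
    have hcontains : (pvFoldA rn).contains x.1 = decide (x.1 ∈ rn.map (·.1)) := by
      rw [PySem.Dict.contains_eq_decide_mem_keys, hkeys]
      simp [PySem.Set.mem_ofList]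
    have hofl : PySem.Set.ofList ((rn ++ [x]).map (·.1))
        = PySem.Set.add (PySem.Set.ofList (rn.map (·.1))) x.1 := by
      simp [List.map_append, PySem.Set.ofList_append, PySem.Set.update_cons,
        PySem.Set.update_nil]
    rw [pvFoldA_append]
    by_cases hmem : x.1 ∈ rn.map (·.1)
    · -- layer already present: overwrite in place
      have hc : (pvFoldA rn).contains x.1 = true := by rw [hcontains]; simp [hmem]
      rw [if_pos hc]
      have hset : PySem.Set.ofList ((rn ++ [x]).map (·.1))
          = PySem.Set.ofList (rn.map (·.1)) := by
        rw [hofl,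
          PySem.Set.add_of_mem ((PySem.Set.mem_ofList _ _).mpr hmem)]
      have hgetD : (pvFoldA rn).getD x.1 []
          = (rn.filter (fun n => n.1 == x.1)).map (·.2) := by
        have hin : (x.1, (rn.filter (fun n => n.1 == x.1)).map (·.2))
            ∈ (pvFoldA rn).items := by
          rw [ih]
          exact List.mem_map_of_mem ((PySem.Set.mem_ofList _ _).mpr hmem)
        exact PySem.Dict.getD_of_mem_items _ hin hnodup []
      rw [PySem.Dict.items_insert_of_contains _ _ hc, ih, hgetD]
      unfold pvGroup
      rw [hset, List.map_map]
      apply List.map_congr_left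
      intro L _hL
      by_cases hLx : L = x.1
      · subst hLx
        simp [List.filter_append, List.map_append]
      · have h1 : (L == x.1) = false := by simp [hLx]
        have h2 : (x.1 == L) = false := by simp [Ne.symm hLx]
        simp [Function.comp, h1, h2, List.filter_append]
    · -- new layer: appended at the end
      have hc : (pvFoldA rn).contains x.1 = false := by rw [hcontains]; simp [hmem]
      rw [if_neg (by simp [hc])]
      rw [PySem.Dict.items_insert_of_not_contains _ _ hc, ih]
      have hset : PySem.Set.ofList ((rn ++ [x]).map (·.1))
          = PySem.Set.ofList (rn.map (·.1)) ++ [x.1] := by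
        rw [hofl,
          PySem.Set.add_of_not_mem (fun h => hmem ((PySem.Set.mem_ofList _ _).mp h))]
      unfold pvGroup
      rw [hset, List.map_append]
      congr 1
      · apply List.map_congr_left
        intro L hL
        have hLx : L ≠ x.1 := fun h => hmem ((PySem.Set.mem_ofList _ _).mp (h ▸ hL))
        have h2 : (x.1 == L) = false := by simp [Ne.symm hLx]
        simp [List.filter_append, h2]
      · have hfilt : rn.filter (fun n => n.1 == x.1) = [] := by
          rw [List.filter_eq_nil_iff]
          intro n hn hx
          exact hmem (List.mem_map.mpr ⟨n, hn, by simpa using hx⟩)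
        simp [List.filter_append, hfilt]

theorem pvAlt_eq_group (rn : List (Int × Int)) :
    get_relevantneurons_alt rn = pvGroup rn := by
  unfold get_relevantneurons_alt pvGroup
  rw [← PySem.Set.update_map_eq_foldl_add, PySem.Set.update_nil_left]

-- ===== VERDICT (by name: the statement is the Claim_ definition above) =====
theorem get_relevantneurons_spec : Claim_equal_get_relevantneurons := by
  intro rn _hdom
  unfold Spec_get_relevantneurons
  show (pvFoldA rn).items = get_relevantneurons_alt rn
  rw [pvItemsFoldA, pvAlt_eq_group]
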